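-- pv_equiv track=rewrite | github.com/Jangidyogesh12/Bigram | tf_idf.py | create_corpus
-- ===== SOURCE A (Python) =====
-- def create_corpus(data):
--     data_corpus = []
--     for i in data:
--         for j in i.split():
--             if(j not in data_corpus):
--                 data_corpus.append(j)
--     data_corpus.sort()
--     return data_corpus
-- ===== SOURCE B (Python) =====
-- def create_corpus(data):
--     words = [w for s in data for w in s.split()]
--     words.sort()
--     result = []
--     for w in words:
--         if not result or w != result[-1]:
--             result.append(w)
--     return result
-- ===== Notes on version B (the rewrite author's own statement) =====
-- stated objective: faster
-- what changed: Collect all words with duplicates, sort once, and deduplicate by a single adjacency pass instead of testing membership in the growing result for every word.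
import Mathlib
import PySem

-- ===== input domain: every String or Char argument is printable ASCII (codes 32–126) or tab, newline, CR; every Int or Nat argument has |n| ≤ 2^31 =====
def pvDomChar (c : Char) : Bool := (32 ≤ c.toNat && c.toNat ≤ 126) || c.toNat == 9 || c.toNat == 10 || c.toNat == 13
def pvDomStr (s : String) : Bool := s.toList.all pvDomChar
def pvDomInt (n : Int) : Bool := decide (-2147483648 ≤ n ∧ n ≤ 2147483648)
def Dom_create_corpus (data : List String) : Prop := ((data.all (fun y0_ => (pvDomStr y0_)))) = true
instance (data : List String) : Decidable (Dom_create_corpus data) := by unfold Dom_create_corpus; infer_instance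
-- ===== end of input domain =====

-- B collects every word with duplicates, sorts once, and deduplicates by one adjacency pass,
-- replacing A's per-word membership scan of the growing result (objective: faster).

-- ===== PORT A =====
def create_corpus (data : List String) : List String :=
  let data_corpus :=
    data.foldl (fun acc i =>
      (PySem.Str.split₀ i).foldl
        (fun acc2 j => if j ∈ acc2 then acc2 else acc2 ++ [j]) acc) []
  PySem.List.sorted data_corpus (fun x => x)

-- ===== PORT B =====
def create_corpus_alt (data : List String) : List String :=
  let words := data.flatMap (fun s => PySem.Str.split₀ s)
  let sortedWords := PySem.List.sorted words (fun x => x)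
  sortedWords.foldl (fun result w =>
    match result.getLast? with
    | none => result ++ [w]                                -- 'not result'
    | some l => if w ≠ l then result ++ [w] else result    -- 'w != result[-1]'
    ) []

-- ===== PRECONDITION & SPEC =====
def Spec_create_corpus (data : List String) (out : List String) : Prop := out = create_corpus_alt data
instance (data : List String) (out : List String) : Decidable (Spec_create_corpus data out) := by unfold Spec_create_corpus; infer_instance

-- ===== CLAIM (what is proved, stated in full; the proofs are below) =====
def Claim_equal_create_corpus : Prop := ∀ (data : List String), Dom_create_corpus data → Spec_create_corpus data (create_corpus data)

-- ===== LEMMAS AND PROOFS =====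

-- A's collection loop: result is nodup and holds exactly the elements of acc and ws.
theorem pv_dedup_fold_spec (ws : List String) : ∀ (acc : List String), acc.Nodup →
    (ws.foldl (fun acc2 j => if j ∈ acc2 then acc2 else acc2 ++ [j]) acc).Nodup ∧
    ∀ x, x ∈ ws.foldl (fun acc2 j => if j ∈ acc2 then acc2 else acc2 ++ [j]) acc ↔ x ∈ acc ∨ x ∈ ws := by
  induction ws with
  | nil => intro acc h; simpa using h
  | cons w t ih =>
    intro acc h
    simp only [List.foldl_cons]
    by_cases hw : w ∈ acc
    · simp only [if_pos hw]
      obtain ⟨h1, h2⟩ := ih acc h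
      refine ⟨h1, fun x => ?_⟩
      rw [h2]
      constructor
      · rintro (hx | hx)
        · exact Or.inl hx
        · exact Or.inr (List.mem_cons_of_mem _ hx)
      · rintro (hx | hx)
        · exact Or.inl hx
        · rcases List.mem_cons.mp hx with rfl | hx'
          · exact Or.inl hw
          · exact Or.inr hx' 
    · simp only [if_neg hw]
      obtain ⟨h1, h2⟩ := ih (acc ++ [w])
        (by simp [List.nodup_append, h]; intro a ha rfl; exact hw ha)
      refine ⟨h1, fun x => ?_⟩
      rw [h2]; simp; tauto

-- In a strictly increasing list, every element is ≤ the last one (here: = last ∨ < last).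
theorem pv_pairwise_last (acc : List String) (l : String) (hp : acc.Pairwise (· < ·))
    (hl : acc.getLast? = some l) : ∀ a ∈ acc, a = l ∨ a < l := by
  induction acc with
  | nil => simp at hl
  | cons b t ih =>
    cases t with
    | nil =>
      simp at hl; intro a ha; simp at ha; left; simp [ha, hl]
    | cons c u =>
      rw [List.getLast?_cons_cons] at hl
      obtain ⟨hb, hp'⟩ := List.pairwise_cons.mp hp
      intro a ha
      rcases List.mem_cons.mp ha with rfl | ha'
      · right
        have : l ∈ c :: u := by
          have := List.mem_of_getLast? (l := c :: u) hl
          exact this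
        exact hb l this
      · exact ih hp' hl a ha'

-- B's adjacency pass: on a ≤-sorted input it yields a <-sorted list with the same members.
theorem pv_adj_fold_spec (ws : List String) : ∀ (acc : List String),
    ws.Pairwise (· ≤ ·) → acc.Pairwise (· < ·) → (∀ a ∈ acc, ∀ s ∈ ws, a ≤ s) →
    (ws.foldl (fun result w =>
      match result.getLast? with
      | none => result ++ [w]
      | some l => if w ≠ l then result ++ [w] else result) acc).Pairwise (· < ·) ∧
    ∀ x, x ∈ ws.foldl (fun result w =>
      match result.getLast? with
      | none => result ++ [w]
      | some l => if w ≠ l then result ++ [w] else result) acc ↔ x ∈ acc ∨ x ∈ ws := by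
  induction ws with
  | nil => intro acc _ hp _; simpa using hp
  | cons w t ih =>
    intro acc hS hp hle
    obtain ⟨hw_le, hS'⟩ := List.pairwise_cons.mp hS
    cases hlast : acc.getLast? with
    | none =>
      have hacc : acc = [] := List.getLast?_eq_none_iff.mp hlast
      subst hacc
      simp only [List.foldl_cons, List.getLast?_nil, List.nil_append]
      obtain ⟨h1, h2⟩ := ih [w] hS' (by simp)
        (by intro a ha s hs; simp at ha; subst ha; exact hw_le s hs)
      refine ⟨h1, fun x => ?_⟩
      rw [h2]; simp
    | some l =>
      have hlmem : l ∈ acc := List.mem_of_getLast? hlast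
      simp only [List.foldl_cons, hlast]
      by_cases hwl : w ≠ l
      · simp only [if_pos hwl]
        have hlt : ∀ a ∈ acc, a < w := by
          intro a ha
          have hal := pv_pairwise_last acc l hp hlast a ha
          have hlw : l ≤ w := hle l hlmem w (List.mem_cons_self)
          rcases hal with rfl | h
          · exact lt_of_le_of_ne hlw (Ne.symm hwl)
          · exact lt_of_lt_of_le h hlw
        obtain ⟨h1, h2⟩ := ih (acc ++ [w])
          (hS')
          (by rw [List.pairwise_append]; exact ⟨hp, by simp, by simpa using hlt⟩)
          (by intro a ha s hs
              rcases List.mem_append.mp ha with ha' | ha'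
              · exact hle a ha' s (List.mem_cons_of_mem _ hs)
              · simp at ha'; subst ha'; exact hw_le s hs)
        refine ⟨h1, fun x => ?_⟩
        rw [h2]; simp; tauto
      · simp only [if_neg hwl]
        have hwl' : w = l := by simpa using hwl
        subst hwl'
        obtain ⟨h1, h2⟩ := ih acc hS' hp
          (fun a ha s hs => hle a ha s (List.mem_cons_of_mem _ hs))
        refine ⟨h1, fun x => ?_⟩
        rw [h2]
        constructor
        · rintro (hx | hx)
          · exact Or.inl hx
          · exact Or.inr (List.mem_cons_of_mem _ hx)
        · rintro (hx | hx)
          · exact Or.inl hx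
          · rcases List.mem_cons.mp hx with rfl | hx'
            · exact Or.inl hlmem
            · exact Or.inr hx' 
-- ===== VERDICT (by name: the statement is the Claim_ definition above) =====
theorem create_corpus_spec : Claim_equal_create_corpus := by
  intro data _
  unfold Spec_create_corpus create_corpus create_corpus_alt
  simp only []
  set words := data.flatMap (fun s => PySem.Str.split₀ s) with hwords
  have hnest :
      data.foldl (fun acc i =>
        (PySem.Str.split₀ i).foldl
          (fun acc2 j => if j ∈ acc2 then acc2 else acc2 ++ [j]) acc) [] =
      words.foldl (fun acc2 j => if j ∈ acc2 then acc2 else acc2 ++ [j]) [] := by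
    rw [hwords, List.foldl_flatMap]
  rw [hnest]
  obtain ⟨hD1, hD2⟩ := pv_dedup_fold_spec words [] (by simp)
  have hSsorted : (PySem.List.sorted words (fun x => x)).Pairwise (· ≤ ·) := by
    simpa using PySem.List.sorted_pairwise words (fun x => x)
  obtain ⟨hR1, hR2⟩ := pv_adj_fold_spec (PySem.List.sorted words (fun x => x)) []
    hSsorted (by simp) (by simp)
  have hRnodup : (((PySem.List.sorted words fun x => x)).foldl (fun result w =>
      match result.getLast? with
      | none => result ++ [w]
      | some l => if w ≠ l then result ++ [w] else result) []).Nodup :=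
    hR1.imp (fun h => ne_of_lt h)
  apply PySem.List.sorted_eq_of_perm_of_pairwise_lt
  · rw [List.perm_ext_iff_of_nodup hRnodup hD1]
    intro a
    rw [hR2, hD2]
    simp [PySem.List.mem_sorted]
  · simpa using hR1
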